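-- pv_equiv track=rewrite | github.com/wudongxiang-git/jenkins-release-scheduler | app.py | _job_parent_folder_paths
-- ===== SOURCE A (Python) =====
-- def _job_parent_folder_paths(job_path):
--     """Jenkins job path 的父文件夹 path 列表（就近优先）。"""
--     parts = job_path.strip().split('/')
--     if len(parts) < 2:
--         return []
--     idx = -2
--     out = []
--     while -idx <= len(parts):
--         parent_path = '/'.join(parts[:idx])
--         if parent_path:
--             out.append(parent_path)
--         idx -= 2
--     return out
-- ===== SOURCE B (Python) =====
-- def _job_parent_folder_paths(job_path):
--     """Jenkins job path 的父文件夹 path 列表（就近优先）— single forward prefix build + stride-2 selection."""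
--     parts = job_path.strip().split('/')
--     n = len(parts)
--     if n < 2:
--         return []
--     # prefix table: prefixes[m-1] == '/'.join(parts[:m]) for m = 1..n, built in one pass
--     prefixes = []
--     cur = parts[0]
--     prefixes.append(cur)
--     for p in parts[1:]:
--         cur = cur + '/' + p
--         prefixes.append(cur)
--     out = []
--     k = n - 2
--     while k > 0:
--         s = prefixes[k - 1]
--         if s:
--             out.append(s)
--         k -= 2
--     return out
-- ===== Notes on version B (the rewrite author's own statement) =====
-- stated objective: alternative
-- what changed: A recomputes the join of a shrinking slice parts[:idx] from scratch at every stride-2 step; B builds all cumulative slash-joined prefixes once in a single forward pass and then just indexes into that table at lengths n-2, n-4, ..., skipping empty prefixes.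
import Mathlib
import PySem

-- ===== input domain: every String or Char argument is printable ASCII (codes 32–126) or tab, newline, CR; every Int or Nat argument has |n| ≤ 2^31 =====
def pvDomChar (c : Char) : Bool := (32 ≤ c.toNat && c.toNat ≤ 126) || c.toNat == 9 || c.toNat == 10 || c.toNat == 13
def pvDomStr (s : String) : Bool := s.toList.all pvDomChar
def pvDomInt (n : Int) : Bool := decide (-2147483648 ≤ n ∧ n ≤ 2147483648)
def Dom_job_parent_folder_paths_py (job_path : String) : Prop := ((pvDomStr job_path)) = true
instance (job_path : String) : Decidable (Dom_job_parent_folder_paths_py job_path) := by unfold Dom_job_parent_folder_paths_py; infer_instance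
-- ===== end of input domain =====

-- B replaces A's per-step join-of-slice recomputation by one forward cumulative-prefix build
-- followed by stride-2 indexed selection; same return value (objective: alternative decomposition).


-- ===== PORT A =====
-- A's while loop: idx = -2, -4, …; at each step joins the slice parts[:idx] and appends it if nonempty
def aLoop (parts : List String) (idx : Int) (out : List String) : List String :=
  if -idx ≤ (parts.length : Int) then
    let parent := PySem.Str.join "/" (PySem.List.slice parts none (some idx))
    aLoop parts (idx - 2) (if parent ≠ "" then out ++ [parent] else out)
  else out
termination_by ((parts.length : Int) + idx + 2).toNat
decreasing_by omega

def job_parent_folder_paths_py (job_path : String) : List String :=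
  let parts := (PySem.Str.split? (PySem.Str.strip job_path) "/").getD []
  if parts.length < 2 then []
  else aLoop parts (-2) []

-- ===== PORT B =====
-- B's forward pass: extend cur with a separator and the next part, recording every cumulative prefix (parts[0] recorded by the caller)
def bPrefixes (rest : List String) (cur : String) : List String :=
  match rest with
  | [] => []
  | q :: qs =>
    let cur' := cur ++ "/" ++ q
    cur' :: bPrefixes qs cur'

-- B's selection loop: k = n-2, n-4, … while k > 0, reading prefixes[k-1], skipping empties
def bSelect (prefixes : List String) (k : Int) : List String :=
  if 0 < k then
    let s := prefixes.getD (k - 1).toNat ""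
    let rest := bSelect prefixes (k - 2)
    if s ≠ "" then s :: rest else rest
  else []
termination_by k.toNat
decreasing_by omega

def job_parent_folder_paths_py_alt (job_path : String) : List String :=
  let parts := (PySem.Str.split? (PySem.Str.strip job_path) "/").getD []
  if parts.length < 2 then []
  else
    match parts with
    | [] => []
    | p :: rest => bSelect (p :: bPrefixes rest p) ((parts.length : Int) - 2)

-- ===== PRECONDITION & SPEC =====
def Spec_job_parent_folder_paths_py (job_path : String) (out : List String) : Prop := out = job_parent_folder_paths_py_alt job_path
instance (job_path : String) (out : List String) : Decidable (Spec_job_parent_folder_paths_py job_path out) := by unfold Spec_job_parent_folder_paths_py; infer_instance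

-- ===== CLAIM (what is proved, stated in full; the proofs are below) =====
def Claim_equal_job_parent_folder_paths_py : Prop := ∀ (job_path : String), Dom_job_parent_folder_paths_py job_path → Spec_job_parent_folder_paths_py job_path (job_parent_folder_paths_py job_path)

-- ===== LEMMAS AND PROOFS =====

-- reference selection: at length m emit '/'-join of the first m parts if nonempty, recurse at m-2
def sel (parts : List String) (m : Int) : List String :=
  if 0 ≤ m then
    let s := PySem.Str.join "/" (parts.take m.toNat)
    let rest := sel parts (m - 2)
    if s ≠ "" then s :: rest else rest
  else []
termination_by (m + 2).toNat
decreasing_by omega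

lemma join_singleton_str (a : String) : PySem.Str.join "/" [a] = a := by
  apply String.toList_inj.mp
  rw [PySem.Str.toList_join]
  simp [PySem.Chars.join_singleton]

lemma join_nil_str : PySem.Str.join "/" ([] : List String) = "" := by
  apply String.toList_inj.mp
  rw [PySem.Str.toList_join]
  simp [PySem.Chars.join_nil]

lemma join_fold_str (p q : String) (t : List String) :
    PySem.Str.join "/" ((p ++ "/" ++ q) :: t) = PySem.Str.join "/" (p :: q :: t) := by
  apply String.toList_inj.mp
  rw [PySem.Str.toList_join, PySem.Str.toList_join]
  cases t with
  | nil =>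
    simp [PySem.Chars.join_singleton, PySem.Chars.join_cons_cons]
  | cons c t' =>
    simp [PySem.Chars.join_cons_cons]

lemma slice_take (xs : List String) (idx : Int) (h : idx < 0) :
    PySem.List.slice xs none (some idx) = xs.take ((xs.length : Int) + idx).toNat := by
  simp only [PySem.List.slice, PySem.List.clampIdx, if_pos h]
  split
  · have : ((xs.length : Int) + idx).toNat = 0 := by omega
    simp [this]
  · simp

lemma aLoop_eq (parts : List String) (idx : Int) (out : List String) (h : idx < 0) :
    aLoop parts idx out = out ++ sel parts ((parts.length : Int) + idx) := by
  by_cases hg : -idx ≤ (parts.length : Int)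
  · rw [aLoop, if_pos hg, sel, if_pos (by omega : (0:Int) ≤ (parts.length : Int) + idx)]
    rw [slice_take parts idx h]
    rw [aLoop_eq parts (idx - 2) _ (by omega)]
    have : (parts.length : Int) + (idx - 2) = (parts.length : Int) + idx - 2 := by ring
    rw [this]
    by_cases hs : PySem.Str.join "/" (parts.take ((parts.length : Int) + idx).toNat) ≠ ""
    · simp [hs, List.append_assoc]
    · simp [hs]
  · rw [aLoop, if_neg hg, sel, if_neg (by omega : ¬ (0:Int) ≤ (parts.length : Int) + idx)]
    simp
termination_by ((parts.length : Int) + idx + 2).toNat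
decreasing_by omega

lemma bPrefix_get (rest : List String) (p : String) (m : Nat) (hm : m ≤ rest.length) :
    (p :: bPrefixes rest p).getD m "" = PySem.Str.join "/" ((p :: rest).take (m + 1)) := by
  induction rest generalizing p m with
  | nil =>
    have h0 : m = 0 := by simpa using hm
    subst h0
    simp [bPrefixes, join_singleton_str]
  | cons q qs ih =>
    cases m with
    | zero => simp [join_singleton_str]
    | succ m' =>
      have hm' : m' ≤ qs.length := by simpa using hm
      show ((p ++ "/" ++ q) :: bPrefixes qs (p ++ "/" ++ q)).getD m' "" = _
      rw [ih (p ++ "/" ++ q) m' hm']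
      show PySem.Str.join "/" (((p ++ "/" ++ q) :: qs).take (m' + 1)) =
        PySem.Str.join "/" ((p :: q :: qs).take (m' + 2))
      simp only [List.take_succ_cons]
      exact join_fold_str p q _

lemma bSelect_eq (parts prefixes : List String)
    (hpre : ∀ m : Nat, m < parts.length → prefixes.getD m "" = PySem.Str.join "/" (parts.take (m + 1)))
    (k : Int) (hk : k ≤ (parts.length : Int)) :
    bSelect prefixes k = sel parts k := by
  by_cases hg : 0 < k
  · rw [bSelect, if_pos hg, sel, if_pos (by omega : (0:Int) ≤ k)]
    have hlt : (k - 1).toNat < parts.length := by omega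
    rw [hpre (k - 1).toNat hlt]
    have : (k - 1).toNat + 1 = k.toNat := by omega
    rw [this, bSelect_eq parts prefixes hpre (k - 2) (by omega)]
  · rw [bSelect, if_neg hg, sel]
    by_cases h0 : (0:Int) ≤ k
    · have hk0 : k = 0 := by omega
      subst hk0
      rw [if_pos (by omega : (0:Int) ≤ 0)]
      simp only [Int.toNat_zero, List.take_zero, join_nil_str]
      rw [sel, if_neg (by omega : ¬ (0:Int) ≤ (0:Int) - 2)]
      simp
    · rw [if_neg h0]
termination_by k.toNat
decreasing_by omega

-- ===== VERDICT (by name: the statement is the Claim_ definition above) =====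
theorem job_parent_folder_paths_py_spec : Claim_equal_job_parent_folder_paths_py := by
  intro job_path _
  show _ = _
  simp only [job_parent_folder_paths_py, job_parent_folder_paths_py_alt]
  generalize (PySem.Str.split? (PySem.Str.strip job_path) "/").getD [] = parts
  by_cases hlen : parts.length < 2
  · rw [if_pos hlen, if_pos hlen]
  · rw [if_neg hlen, if_neg hlen]
    match parts, hlen with
    | p :: rest, hlen =>
      rw [aLoop_eq (p :: rest) (-2) [] (by omega)]
      have hpre : ∀ m : Nat, m < (p :: rest).length →
          (p :: bPrefixes rest p).getD m "" = PySem.Str.join "/" ((p :: rest).take (m + 1)) := by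
        intro m hm
        exact bPrefix_get rest p m (by simp at hm; omega)
      show [] ++ sel (p :: rest) (((p :: rest).length : Int) + (-2)) =
        bSelect (p :: bPrefixes rest p) (((p :: rest).length : Int) - 2)
      rw [bSelect_eq (p :: rest) (p :: bPrefixes rest p) hpre
        (((p :: rest).length : Int) - 2) (by omega)]
      have harg : ((p :: rest).length : Int) + (-2) = ((p :: rest).length : Int) - 2 := by ring
      rw [harg, List.nil_append]
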